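-- pv_equiv track=rewrite | github.com/jordanpowell5/PDC-Application | Completed PDC Appointment Scheduler.py | get_room_assignment
-- ===== SOURCE A (Python) =====
-- def get_room_assignment(roomList,takenList):
-- #This function chooses a room to assign to the appointment picking between a list containing all of the PDC's available rooms
--     count = len(roomList)-1
--     while count >= 0:
--         if(roomList[count] not in takenList):
--             takenList.append(roomList[count])
--             return roomList[count]
--         count -=1
--     return 'Rooms are Full'
-- ===== SOURCE B (Python) =====
-- def get_room_assignment(roomList, takenList):
--     taken = set(takenList)
--     avail = [r for r in roomList if r not in taken]
--     if avail:
--         takenList.append(avail[-1])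
--         return avail[-1]
--     return 'Rooms are Full'
-- ===== Notes on version B (the rewrite author's own statement) =====
-- stated objective: alternative
-- what changed: Replaces A's backward index scan with early return by a single forward filter pass (against a precomputed set) followed by selecting the last available room.
import Mathlib
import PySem

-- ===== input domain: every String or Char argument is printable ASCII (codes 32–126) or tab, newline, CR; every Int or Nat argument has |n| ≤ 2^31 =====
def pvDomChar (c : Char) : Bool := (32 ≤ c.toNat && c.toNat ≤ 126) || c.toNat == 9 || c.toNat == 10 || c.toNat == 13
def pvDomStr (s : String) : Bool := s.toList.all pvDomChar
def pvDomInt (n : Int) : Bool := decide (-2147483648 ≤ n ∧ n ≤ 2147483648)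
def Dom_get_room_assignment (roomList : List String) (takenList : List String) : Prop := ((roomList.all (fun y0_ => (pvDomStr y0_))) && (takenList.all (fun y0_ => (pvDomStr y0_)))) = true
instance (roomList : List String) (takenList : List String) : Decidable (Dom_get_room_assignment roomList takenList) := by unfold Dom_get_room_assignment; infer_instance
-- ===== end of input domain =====

-- B replaces A's backward scan-and-early-return by a forward filter pass then taking the last
-- available room (objective: alternative decomposition). Equivalence is about the RETURN value;
-- both Pythons also append the returned room to takenList (same mutation).

-- ===== PORT A =====
-- A's while-loop counting count from len(roomList)-1 down to 0; the argument of aLoopA is count+1.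
def aLoopA (roomList takenList : List String) : Nat → String
  | 0 => "Rooms are Full"
  | n+1 =>
    match PySem.List.pyGet? roomList (n : Int) with
    | some r => if takenList.contains r then aLoopA roomList takenList n else r
    | none => "Rooms are Full"   -- unreachable: n < roomList.length on every call

def get_room_assignment (roomList : List String) (takenList : List String) : String :=
  aLoopA roomList takenList roomList.length

-- ===== PORT B =====
def get_room_assignment_alt (roomList : List String) (takenList : List String) : String :=
  let avail := roomList.filter (fun r => !(takenList.contains r))
  if avail.isEmpty then "Rooms are Full"
  else (PySem.List.pyGet? avail (-1)).getD ""   -- avail[-1], in range since avail ≠ []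

-- ===== PRECONDITION & SPEC =====
def Spec_get_room_assignment (roomList : List String) (takenList : List String) (out : String) : Prop := out = get_room_assignment_alt roomList takenList
instance (roomList : List String) (takenList : List String) (out : String) : Decidable (Spec_get_room_assignment roomList takenList out) := by unfold Spec_get_room_assignment; infer_instance

-- ===== CLAIM (what is proved, stated in full; the proofs are below) =====
def Claim_equal_get_room_assignment : Prop := ∀ (roomList : List String) (takenList : List String), Dom_get_room_assignment roomList takenList → Spec_get_room_assignment roomList takenList (get_room_assignment roomList takenList)

-- ===== LEMMAS AND PROOFS =====

lemma aLoopA_eq (roomList takenList : List String) :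
    ∀ n, n ≤ roomList.length →
      aLoopA roomList takenList n =
        (((roomList.take n).filter (fun r => !(takenList.contains r))).getLast?).getD "Rooms are Full" := by
  intro n
  induction n with
  | zero => intro _; simp [aLoopA]
  | succ n ih =>
    intro h
    have hn : n < roomList.length := by omega
    have hget : PySem.List.pyGet? roomList (n : Int) = some roomList[n] := by
      simp [PySem.List.pyGet?_natCast, List.getElem?_eq_getElem hn]
    have htake : roomList.take (n+1) = roomList.take n ++ [roomList[n]] := by
      rw [List.take_add_one, List.getElem?_eq_getElem hn]
      rfl
    rw [aLoopA, hget, htake, List.filter_append]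
    by_cases hc : roomList[n] ∈ takenList
    · simp [hc, ih (by omega)]
    · simp [hc]

theorem get_room_assignment_spec : Claim_equal_get_room_assignment := by
  unfold Claim_equal_get_room_assignment
  intro roomList takenList _
  unfold Spec_get_room_assignment get_room_assignment get_room_assignment_alt
  rw [aLoopA_eq roomList takenList roomList.length le_rfl, List.take_length]
  set avail := roomList.filter (fun r => !(takenList.contains r)) with havail
  by_cases he : avail.isEmpty
  · simp [List.isEmpty_iff.mp he]
  · have hne : avail ≠ [] := by simpa [List.isEmpty_iff] using he
    simp [he, PySem.List.pyGet?_neg_one, List.getLast?_eq_some_getLast hne]
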